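-- pv_equiv track=rewrite | github.com/SteveGJones/ai-first-sdlc-practices | tools/coaching/vision-to-team-mapper.py | _extract_special_requirements
-- ===== SOURCE A (Python) =====
-- from typing import Dict, List, Optional, Set
--
-- def _extract_special_requirements(vision: str) -> Set[str]:
--     """Extracts special requirements from vision"""
--     vision_lower = vision.lower()
--     requirements = set()
--
--     # Security requirements
--     if any(term in vision_lower for term in ["secure", "security", "auth", "login", "privacy", "gdpr", "compliance"]):
--         requirements.add("security")
--
--     # Performance requirements
--     if any(term in vision_lower for term in ["fast", "performance", "scale", "million", "thousand", "concurrent"]):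
--         requirements.add("performance")
--
--     # Real-time requirements
--     if any(term in vision_lower for term in ["real-time", "live", "instant", "websocket", "streaming"]):
--         requirements.add("realtime")
--
--     # Mobile requirements
--     if any(term in vision_lower for term in ["mobile", "responsive", "ios", "android"]):
--         requirements.add("mobile")
--
--     # AI requirements
--     if any(term in vision_lower for term in ["ai", "intelligent", "smart", "ml", "learning"]):
--         requirements.add("ai")
--
--     return requirements
-- ===== SOURCE B (Python) =====
-- CATEGORIES = [
--     ("security", ["secure", "security", "auth", "login", "privacy", "gdpr", "compliance"]),
--     ("performance", ["fast", "performance", "scale", "million", "thousand", "concurrent"]),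
--     ("realtime", ["real-time", "live", "instant", "websocket", "streaming"]),
--     ("mobile", ["mobile", "responsive", "ios", "android"]),
--     ("ai", ["ai", "intelligent", "smart", "ml", "learning"]),
-- ]
--
-- # the distinct keyword lengths; a slice of any other length can never be a keyword
-- LENGTHS = [2, 3, 4, 5, 6, 7, 8, 9, 10, 11]
--
-- def _extract_special_requirements(vision: str):
--     low = vision.lower()
--     # index the text once: every substring whose length could be a keyword's
--     grams = {low[i:i + L] for i in range(len(low)) for L in LENGTHS}
--     # then each keyword test is a set lookup, not a substring scan
--     return {tag for tag, kws in CATEGORIES if any(k in grams for k in kws)}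
-- ===== Notes on version B (the rewrite author's own statement) =====
-- stated objective: alternative
-- what changed: Instead of running a substring search per keyword, B scans the text once building a set of all substrings of keyword-relevant lengths, then decides each tag by set lookups of its keywords against that index.
import Mathlib
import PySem

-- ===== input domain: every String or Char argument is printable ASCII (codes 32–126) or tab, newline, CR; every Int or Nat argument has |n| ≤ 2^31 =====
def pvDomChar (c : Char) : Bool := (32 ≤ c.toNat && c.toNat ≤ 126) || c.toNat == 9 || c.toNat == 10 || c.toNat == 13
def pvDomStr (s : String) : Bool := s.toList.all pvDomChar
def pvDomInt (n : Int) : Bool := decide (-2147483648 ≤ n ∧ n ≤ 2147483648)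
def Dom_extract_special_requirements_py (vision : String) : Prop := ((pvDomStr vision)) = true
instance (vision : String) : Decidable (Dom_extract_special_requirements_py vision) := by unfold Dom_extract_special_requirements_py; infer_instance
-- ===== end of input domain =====

-- B replaces A's per-keyword substring searches by one scan of the text that builds a set of all
-- substrings of keyword-relevant lengths, deciding each tag by set lookups (alternative decomposition).


-- ===== PORT A =====
def extract_special_requirements_py (vision : String) : List String :=
  let vision_lower := PySem.Str.lower vision
  let requirements : PySem.Set String := PySem.Set.empty
  let requirements :=
    if ["secure", "security", "auth", "login", "privacy", "gdpr", "compliance"].any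
        (fun term => PySem.Str.isIn term vision_lower) then
      requirements.add "security" else requirements
  let requirements :=
    if ["fast", "performance", "scale", "million", "thousand", "concurrent"].any
        (fun term => PySem.Str.isIn term vision_lower) then
      requirements.add "performance" else requirements
  let requirements :=
    if ["real-time", "live", "instant", "websocket", "streaming"].any
        (fun term => PySem.Str.isIn term vision_lower) then
      requirements.add "realtime" else requirements
  let requirements :=
    if ["mobile", "responsive", "ios", "android"].any
        (fun term => PySem.Str.isIn term vision_lower) then
      requirements.add "mobile" else requirements
  let requirements :=
    if ["ai", "intelligent", "smart", "ml", "learning"].any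
        (fun term => PySem.Str.isIn term vision_lower) then
      requirements.add "ai" else requirements
  requirements

-- ===== PORT B =====
def pvCategories : List (String × List String) :=
  [ ("security", ["secure", "security", "auth", "login", "privacy", "gdpr", "compliance"]),
    ("performance", ["fast", "performance", "scale", "million", "thousand", "concurrent"]),
    ("realtime", ["real-time", "live", "instant", "websocket", "streaming"]),
    ("mobile", ["mobile", "responsive", "ios", "android"]),
    ("ai", ["ai", "intelligent", "smart", "ml", "learning"]) ]

-- the distinct keyword lengths (LENGTHS in Source B)
def pvLengths : List Int := [2, 3, 4, 5, 6, 7, 8, 9, 10, 11]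

-- grams = {low[i:i+L] for i in range(len(low)) for L in LENGTHS}
def pvGrams (low : String) : PySem.Set String :=
  PySem.Set.ofList
    ((PySem.List.pyRange 0 (PySem.Str.len low) 1).flatMap (fun i =>
      pvLengths.map (fun L => PySem.Str.slice low (some i) (some (i + L)))))

def extract_special_requirements_py_alt (vision : String) : List String :=
  let low := PySem.Str.lower vision
  let grams := pvGrams low
  PySem.Set.ofList
    ((pvCategories.filter (fun p => p.2.any (fun k => PySem.Set.contains grams k))).map Prod.fst)

-- ===== PRECONDITION & SPEC =====
def Spec_extract_special_requirements_py (vision : String) (out : List String) : Prop := out = extract_special_requirements_py_alt vision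
instance (vision : String) (out : List String) : Decidable (Spec_extract_special_requirements_py vision out) := by unfold Spec_extract_special_requirements_py; infer_instance

-- ===== CLAIM (what is proved, stated in full; the proofs are below) =====
def Claim_equal_extract_special_requirements_py : Prop := ∀ (vision : String), Dom_extract_special_requirements_py vision → Spec_extract_special_requirements_py vision (extract_special_requirements_py vision)

-- ===== LEMMAS AND PROOFS =====

-- membership in the gram index is exactly Python's `kw in low` for a nonempty keyword of indexed length
theorem contains_pvGrams (low k : String) (hne : k.toList ≠ [])
    (hlen : (k.toList.length : Int) ∈ pvLengths) :
    PySem.Set.contains (pvGrams low) k = PySem.Str.isIn k low := by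
  have hmem : k ∈ pvGrams low ↔ PySem.Str.isIn k low = true := by
    unfold pvGrams
    rw [PySem.Set.mem_ofList]
    simp only [List.mem_flatMap, List.mem_map, PySem.List.mem_pyRange_one, PySem.Str.len_eq]
    constructor
    · rintro ⟨i, ⟨hi0, hilt⟩, L, hL, hsl⟩
      have hL0 : 0 ≤ L := by
        fin_cases hL <;> norm_num
      rw [PySem.Str.isIn, ← PySem.Chars.exists_prefix_drop_iff_isIn]
      refine ⟨i.toNat, ?_⟩
      have : k.toList = PySem.List.slice low.toList (some i) (some (i + L)) := by
        rw [← hsl]; simp [PySem.Str.slice]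
      rw [this, PySem.List.slice_toNat low.toList hi0 (by omega)]
      exact List.take_prefix _ _
    · intro hin
      rw [PySem.Str.isIn, ← PySem.Chars.exists_prefix_drop_iff_isIn] at hin
      obtain ⟨j, hj⟩ := hin
      have hdropne : low.toList.drop j ≠ [] := by
        intro hnil
        rw [hnil, List.prefix_nil] at hj
        exact hne hj
      have hjlt : j < low.toList.length := by
        by_contra hge
        exact hdropne (List.drop_eq_nil_of_le (by omega))
      refine ⟨(j : Int), ⟨by positivity, by exact_mod_cast hjlt⟩, (k.toList.length : Int), hlen, ?_⟩
      apply String.toList_inj.mp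
      simp only [PySem.Str.slice, PySem.Chars.slice_eq_listSlice]
      rw [PySem.List.slice_natCast_add low.toList j k.toList.length]
      simp only [String.toList_ofList]
      exact (List.prefix_iff_eq_take.mp hj).symm
  have h1 : PySem.Set.contains (pvGrams low) k = true ↔ PySem.Str.isIn k low = true := by
    rw [PySem.Set.contains, List.contains_iff_mem]
    exact hmem
  cases hsi : PySem.Str.isIn k low
  · rw [hsi] at h1
    simpa using h1
  · rw [hsi] at h1
    simpa using h1

-- a category's set-lookup test equals A's substring test when every keyword is nonempty with indexed length
theorem any_contains_eq (low : String) (kws : List String)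
    (h : ∀ k ∈ kws, k.toList ≠ [] ∧ (k.toList.length : Int) ∈ pvLengths) :
    kws.any (fun k => PySem.Set.contains (pvGrams low) k)
      = kws.any (fun k => PySem.Str.isIn k low) := by
  induction kws with
  | nil => rfl
  | cons x xs ih =>
      simp only [List.any_cons]
      rw [contains_pvGrams low x (h x (by simp)).1 (h x (by simp)).2,
          ih (fun k hk => h k (by simp [hk]))]

theorem extract_special_requirements_py_eq_alt (vision : String) :
    extract_special_requirements_py vision = extract_special_requirements_py_alt vision := by
  unfold extract_special_requirements_py extract_special_requirements_py_alt pvCategories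
  simp only [List.filter]
  rw [any_contains_eq _ _ (by decide), any_contains_eq _ _ (by decide),
      any_contains_eq _ _ (by decide), any_contains_eq _ _ (by decide),
      any_contains_eq _ _ (by decide)]
  generalize (["secure", "security", "auth", "login", "privacy", "gdpr", "compliance"].any
      (fun term => PySem.Str.isIn term (PySem.Str.lower vision))) = c1
  generalize (["fast", "performance", "scale", "million", "thousand", "concurrent"].any
      (fun term => PySem.Str.isIn term (PySem.Str.lower vision))) = c2
  generalize (["real-time", "live", "instant", "websocket", "streaming"].any
      (fun term => PySem.Str.isIn term (PySem.Str.lower vision))) = c3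
  generalize (["mobile", "responsive", "ios", "android"].any
      (fun term => PySem.Str.isIn term (PySem.Str.lower vision))) = c4
  generalize (["ai", "intelligent", "smart", "ml", "learning"].any
      (fun term => PySem.Str.isIn term (PySem.Str.lower vision))) = c5
  cases c1 <;> cases c2 <;> cases c3 <;> cases c4 <;> cases c5 <;> decide

-- ===== VERDICT (by name: the statement is the Claim_ definition above) =====
theorem extract_special_requirements_py_spec : Claim_equal_extract_special_requirements_py := by
  intro vision _
  exact extract_special_requirements_py_eq_alt vision
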